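-- pv_equiv track=rewrite | github.com/i-nick/litellm-rs | scripts/sync_models.py | group_by_provider
-- ===== SOURCE A (Python) =====
-- from typing import Any, Dict, List, Optional
--
-- def group_by_provider(models: List[Dict[str, Any]]) -> Dict[str, List[Dict[str, Any]]]:
--     """Group models by provider."""
--     grouped: Dict[str, List[Dict[str, Any]]] = {}
--     for model in models:
--         provider = model["provider"]
--         if provider not in grouped:
--             grouped[provider] = []
--         grouped[provider].append(model)
--     return grouped
-- ===== SOURCE B (Python) =====
-- def group_by_provider(models):
--     """Group models by provider: collect distinct providers in first-appearance
--     order, then build each group with one filtering pass over the full list."""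
--     providers = []
--     for model in models:
--         p = model["provider"]
--         if p not in providers:
--             providers.append(p)
--     return {p: [m for m in models if m["provider"] == p] for p in providers}
-- ===== Notes on version B (the rewrite author's own statement) =====
-- stated objective: alternative
-- what changed: Replaces the single-pass running dict (create-empty-then-append per model) with a two-phase strategy: first collect the distinct providers in first-appearance order, then build each group as one filter pass over the whole list.
import Mathlib
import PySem

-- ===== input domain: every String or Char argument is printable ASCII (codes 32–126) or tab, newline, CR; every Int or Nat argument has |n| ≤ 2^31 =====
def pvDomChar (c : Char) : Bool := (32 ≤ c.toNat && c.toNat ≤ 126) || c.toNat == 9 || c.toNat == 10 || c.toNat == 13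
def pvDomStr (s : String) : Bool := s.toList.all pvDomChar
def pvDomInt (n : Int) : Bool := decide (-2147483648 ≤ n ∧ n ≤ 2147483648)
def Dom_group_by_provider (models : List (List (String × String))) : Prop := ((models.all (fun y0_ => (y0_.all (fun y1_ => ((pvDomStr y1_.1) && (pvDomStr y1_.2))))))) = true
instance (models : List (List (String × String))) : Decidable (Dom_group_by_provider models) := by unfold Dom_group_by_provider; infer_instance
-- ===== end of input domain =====

-- B groups by a different strategy (distinct providers first, then one filter pass per
-- provider) instead of A's single running dict; same return value on every input where
-- the Python A returns (Pre_: every model has a "provider" key; otherwise A raises KeyError).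

-- model["provider"] for a model given as an association list (dict lookup = first match);
-- totalised with "" as default: under Pre_ the key is always present.
def providerOf (m : List (String × String)) : String :=
  ((PySem.Dict.mk m).get? "provider").getD ""

-- ===== PORT A =====
def group_by_provider (models : List (List (String × String))) : List (String × List (List (String × String))) :=
  (models.foldl
    (fun (grouped : PySem.Dict String (List (List (String × String)))) model =>
      let provider := providerOf model
      let grouped := if grouped.contains provider then grouped else grouped.insert provider []
      grouped.modify provider [] (fun l => l ++ [model]))
    PySem.Dict.empty).items

-- ===== PORT B =====
def group_by_provider_alt (models : List (List (String × String))) : List (String × List (List (String × String))) :=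
  let providers : PySem.Set String :=
    models.foldl (fun s model => PySem.Set.add s (providerOf model)) PySem.Set.empty
  providers.map (fun p => (p, models.filter (fun m => providerOf m == p)))

-- ===== PRECONDITION & SPEC =====
-- Pre_: every model carries the "provider" key — on any other input the Python A raises KeyError.
def Pre_group_by_provider (models : List (List (String × String))) : Prop :=
  (models.all (fun m => m.any (fun kv => kv.1 == "provider"))) = true
instance (models : List (List (String × String))) : Decidable (Pre_group_by_provider models) := by unfold Pre_group_by_provider; infer_instance

def pvWitness_group_by_provider : (List (List (String × String))) :=
  [[("provider", "openai"), ("name", "gpt")], [("provider", "anthropic")], [("provider", "openai"), ("name", "o1")]]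

def Spec_group_by_provider (models : List (List (String × String))) (out : List (String × List (List (String × String)))) : Prop := out = group_by_provider_alt models
instance (models : List (List (String × String))) (out : List (String × List (List (String × String)))) : Decidable (Spec_group_by_provider models out) := by unfold Spec_group_by_provider; infer_instance

-- ===== CLAIM (what is proved, stated in full; the proofs are below) =====
def Claim_equal_group_by_provider : Prop := ∀ (models : List (List (String × String))), Dom_group_by_provider models → Pre_group_by_provider models → Spec_group_by_provider models (group_by_provider models)

-- ===== LEMMAS AND PROOFS =====

-- A's loop body (create-empty-bucket-if-missing, then append) collapses to a single
-- overwrite-insert at the model's provider key.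
lemma stepA_eq (d : PySem.Dict String (List (List (String × String)))) (m : List (String × String)) :
    (let provider := providerOf m
     let d' := if d.contains provider then d else d.insert provider []
     d'.modify provider [] (fun l => l ++ [m]))
    = d.insert (providerOf m) (d.getD (providerOf m) [] ++ [m]) := by
  by_cases hc : d.contains (providerOf m)
  · simp [hc, PySem.Dict.modify]
  · simp only [Bool.not_eq_true] at hc
    simp [hc, PySem.Dict.modify, PySem.Dict.insert_insert_self,
      PySem.Dict.getD_of_not_contains d _ hc]

-- A's whole loop rewritten through stepA_eq
lemma foldA_eq (models : List (List (String × String)))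
    (d : PySem.Dict String (List (List (String × String)))) :
    models.foldl
      (fun grouped model =>
        let provider := providerOf model
        let grouped := if grouped.contains provider then grouped else grouped.insert provider []
        grouped.modify provider [] (fun l => l ++ [model])) d
    = models.foldl (fun d m => d.insert (providerOf m) (d.getD (providerOf m) [] ++ [m])) d := by
  simp only [stepA_eq]

lemma getD_foldA (models : List (List (String × String)))
    (d : PySem.Dict String (List (List (String × String)))) (c : String) :
    (models.foldl (fun d m => d.insert (providerOf m) (d.getD (providerOf m) [] ++ [m])) d).getD c []
    = d.getD c [] ++ models.filter (fun m => providerOf m == c) := by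
  have h := PySem.Dict.getD_foldl_modify_append (models.map (fun m => (providerOf m, m))) d c
  simp only [List.foldl_map, List.filter_map, List.map_map, PySem.Dict.modify] at h
  simpa [Function.comp_def] using h

-- ===== VERDICT (by name: the statement is the Claim_ definition above) =====
theorem group_by_provider_spec : Claim_equal_group_by_provider := by
  intro models _ _
  unfold Spec_group_by_provider group_by_provider group_by_provider_alt
  rw [foldA_eq]
  set D := models.foldl (fun d m => d.insert (providerOf m) (d.getD (providerOf m) [] ++ [m]))
    PySem.Dict.empty with hD
  have hnd : D.keys.Nodup := PySem.Dict.nodup_keys_foldl_insert_key models providerOf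
    (fun d m => d.getD (providerOf m) [] ++ [m]) PySem.Dict.empty PySem.Dict.nodup_keys_empty
  have hkeys : D.keys = PySem.Set.ofList (models.map providerOf) := by
    rw [hD, PySem.Dict.keys_foldl_insert_key models providerOf
      (fun d m => d.getD (providerOf m) [] ++ [m]) PySem.Dict.empty,
      PySem.Dict.keys_empty, PySem.Set.update_nil_left]
  rw [PySem.Dict.items_eq_map_keys D hnd [], hkeys,
    ← PySem.Set.update_map_eq_foldl_add models providerOf PySem.Set.empty]
  have hfun : (fun k => (k, D.getD k [])) = fun p => (p, models.filter (fun m => providerOf m == p)) := by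
    funext p
    rw [hD, getD_foldA]
    simp [PySem.Dict.getD_empty]
  rw [hfun]
  rfl
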